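-- pv_equiv track=rewrite | github.com/CarrieLS/Advent-of-Code-2025--Python- | day5.py | _binarySearchHelper
-- ===== SOURCE A (Python) =====
-- def _binarySearchHelper(val,lst,isMax):
--     min_i = 0
--     max_i = len(lst)
--     while max_i > min_i:
--         i = (max_i + min_i)//2
--         if val == lst[i]:
--             #found
--             if isMax:
--                 return i+1
--             return i
--         elif val > lst[i]:
--             min_i = i+1
--         else:
--             max_i = i
--     return min_i
-- ===== SOURCE B (Python) =====
-- def _binarySearchHelper(val, lst, isMax):
--     # Recursive divide-and-conquer on sublist segments; same midpoint path
--     # and tie-break as the iterative version.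
--     def go(seg, base):
--         if not seg:
--             return base
--         m = len(seg) // 2
--         x = seg[m]
--         if val == x:
--             return base + m + (1 if isMax else 0)
--         if val > x:
--             return go(seg[m + 1:], base + m + 1)
--         return go(seg[:m], base)
--     return go(lst, 0)
-- ===== Notes on version B (the rewrite author's own statement) =====
-- stated objective: alternative
-- what changed: Replaced the iterative while-loop over (min_i,max_i) index bounds with a recursive divide-and-conquer helper that recurses on list slices carrying a base offset; the midpoint sequence and tie-break are identical, so outputs match on all inputs.
import Mathlib
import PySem

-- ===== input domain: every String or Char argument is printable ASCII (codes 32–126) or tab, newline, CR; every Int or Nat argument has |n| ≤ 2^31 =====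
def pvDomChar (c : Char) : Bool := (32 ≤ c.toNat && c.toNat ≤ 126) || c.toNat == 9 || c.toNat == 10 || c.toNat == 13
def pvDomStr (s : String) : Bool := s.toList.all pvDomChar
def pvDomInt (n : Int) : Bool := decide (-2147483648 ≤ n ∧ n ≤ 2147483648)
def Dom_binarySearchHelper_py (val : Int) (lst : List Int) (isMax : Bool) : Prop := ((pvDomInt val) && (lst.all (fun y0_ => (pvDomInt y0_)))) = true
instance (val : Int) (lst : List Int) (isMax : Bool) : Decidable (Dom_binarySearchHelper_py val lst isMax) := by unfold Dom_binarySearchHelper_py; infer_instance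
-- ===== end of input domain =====

-- B replaces A's iterative two-index while-loop by a recursive divide-and-conquer
-- on list segments with a base offset; same midpoint path, so same result (proved below).

-- ===== PORT A =====
-- A's while-loop over the state (min_i, max_i); lst[i] is ported as getD: the loop
-- invariant keeps 0 ≤ min_i ≤ i < max_i ≤ len(lst), so the index is always in range
-- and Python never raises (the default is unreachable).
def pvLoopA (val : Int) (lst : List Int) (isMax : Bool) (min_i max_i : Int) : Int :=
  if _h : max_i > min_i then
    let i := PySem.Int.floordiv (max_i + min_i) 2
    let x := lst.getD i.toNat 0
    if val = x then (if isMax then i + 1 else i)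
    else if val > x then pvLoopA val lst isMax (i + 1) max_i
    else pvLoopA val lst isMax min_i i
  else min_i
termination_by (max_i - min_i).toNat
decreasing_by
  all_goals
    simp only [PySem.Int.floordiv_eq_ediv_of_pos (by norm_num : (0:Int) < 2)] at *
    omega

def binarySearchHelper_py (val : Int) (lst : List Int) (isMax : Bool) : Int :=
  pvLoopA val lst isMax 0 (lst.length : Int)

-- ===== PORT B =====
-- Source B's inner 'go': seg[m] (0 ≤ m < len seg) is getD; seg[m+1:] / seg[:m] with
-- nonnegative bounds are List.drop / List.take (exact there).
def pvGoB (val : Int) (isMax : Bool) (seg : List Int) (base : Int) : Int :=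
  if _h : seg = [] then base
  else
    let m := seg.length / 2
    let x := seg.getD m 0
    if val = x then base + m + (if isMax then 1 else 0)
    else if val > x then pvGoB val isMax (seg.drop (m + 1)) (base + m + 1)
    else pvGoB val isMax (seg.take m) base
termination_by seg.length
decreasing_by
  all_goals
    have : seg.length ≠ 0 := by simpa [List.length_eq_zero_iff] using _h
    simp [List.length_drop, List.length_take]
    omega

def binarySearchHelper_py_alt (val : Int) (lst : List Int) (isMax : Bool) : Int :=
  pvGoB val isMax lst 0

-- ===== PRECONDITION & SPEC =====
def Spec_binarySearchHelper_py (val : Int) (lst : List Int) (isMax : Bool) (out : Int) : Prop := out = binarySearchHelper_py_alt val lst isMax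
instance (val : Int) (lst : List Int) (isMax : Bool) (out : Int) : Decidable (Spec_binarySearchHelper_py val lst isMax out) := by unfold Spec_binarySearchHelper_py; infer_instance

-- ===== CLAIM (what is proved, stated in full; the proofs are below) =====
def Claim_equal_binarySearchHelper_py : Prop := ∀ (val : Int) (lst : List Int) (isMax : Bool), Dom_binarySearchHelper_py val lst isMax → Spec_binarySearchHelper_py val lst isMax (binarySearchHelper_py val lst isMax)

-- ===== LEMMAS AND PROOFS =====

-- Loop ↔ recursion correspondence: A's loop from bounds (lo, hi) computes what
-- B's 'go' computes on the segment lst[lo:hi] with base lo.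
theorem pvLoopA_eq_goB (val : Int) (lst : List Int) (isMax : Bool) :
    ∀ (n : Nat) (lo hi : Int), (hi - lo).toNat = n → 0 ≤ lo → lo ≤ hi → hi ≤ (lst.length : Int) →
      pvLoopA val lst isMax lo hi = pvGoB val isMax ((lst.drop lo.toNat).take (hi - lo).toNat) lo := by
  intro n
  induction n using Nat.strong_induction_on with
  | _ n ih =>
    intro lo hi hn h0 hlh hhl
    by_cases hlt : lo < hi
    · -- one step of the loop = one step of the recursion
      set k := (hi - lo).toNat with hk
      set seg := (lst.drop lo.toNat).take k with hseg
      have hsegne : seg ≠ [] := by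
        have : seg.length = k := by
          simp [hseg, List.length_take, List.length_drop]; omega
        intro h; rw [h] at this; simp at this; omega
      have hlen : seg.length = k := by
        simp [hseg, List.length_take, List.length_drop]; omega
      rw [pvLoopA, pvGoB]
      simp only [hlt, gt_iff_lt, dif_pos, hsegne, dif_neg, not_false_iff]
      set m := seg.length / 2 with hm
      have hmk : m = k / 2 := by rw [hm, hlen]
      have hkpos : 0 < k := by omega
      have hmltk : m < k := by omega
      have hi_eq : PySem.Int.floordiv (hi + lo) 2 = lo + (m : Int) := by
        rw [PySem.Int.floordiv_eq_ediv_of_pos (by norm_num : (0:Int) < 2)]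
        omega
      have hiN : (lo + (m : Int)).toNat = lo.toNat + m := by omega
      have hx : lst.getD (lo + (m : Int)).toNat 0 = seg.getD m 0 := by
        have hmlt : m < seg.length := by omega
        have hidx : lo.toNat + m < lst.length := by omega
        rw [List.getD_eq_getElem _ _ hmlt, List.getD_eq_getElem _ _ (by omega : (lo + (m:Int)).toNat < lst.length)]
        simp [hseg, List.getElem_take, List.getElem_drop, hiN]
      rw [hi_eq, hx]
      by_cases heq : val = seg.getD m 0
      · simp only [heq]
        cases isMax <;> simp
      · simp only [if_neg heq]
        by_cases hgt : val > seg.getD m 0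
        · simp only [if_pos hgt]
          have hdrop : (lst.drop (lo + (m:Int) + 1).toNat).take (hi - (lo + (m:Int) + 1)).toNat
              = seg.drop (m + 1) := by
            rw [hseg, List.drop_take, List.drop_drop]
            have h1 : (lo + (m:Int) + 1).toNat = lo.toNat + (m + 1) := by omega
            have h2 : (hi - (lo + (m:Int) + 1)).toNat = k - (m + 1) := by omega
            rw [h1, h2]
          have hrec := ih (hi - (lo + (m:Int) + 1)).toNat (by omega)
            (lo + (m:Int) + 1) hi rfl (by omega) (by omega) hhl
          rw [hrec, hdrop]
        · simp only [if_neg hgt]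
          have htake : (lst.drop lo.toNat).take ((lo + (m:Int)) - lo).toNat = seg.take m := by
            rw [hseg, List.take_take]
            have h1 : ((lo + (m:Int)) - lo).toNat = min m k := by omega
            rw [h1]
          have hrec := ih ((lo + (m:Int)) - lo).toNat (by omega)
            lo (lo + (m:Int)) rfl h0 (by omega) (by omega)
          rw [hrec, htake]
    · -- empty interval: loop exits, segment is empty
      have hhi : hi = lo := le_antisymm (le_of_not_gt hlt) hlh
      rw [pvLoopA, pvGoB]
      simp [hhi]

-- ===== VERDICT (by name: the statement is the Claim_ definition above) =====
theorem binarySearchHelper_py_spec : Claim_equal_binarySearchHelper_py := by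
  intro val lst isMax _
  unfold Spec_binarySearchHelper_py binarySearchHelper_py binarySearchHelper_py_alt
  have h := pvLoopA_eq_goB val lst isMax ((lst.length : Int) - 0).toNat 0 (lst.length : Int)
    rfl le_rfl (by exact_mod_cast Int.natCast_nonneg _) le_rfl
  simpa using h
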